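-- pv_equiv track=rewrite | github.com/myreprise/advent_of_code | 2015/day11 - corporate policy/p2_solution.py | contains_two_pairs
-- ===== SOURCE A (Python) =====
-- def contains_two_pairs(password):
--     pairs = set()
--     i = 0
--     while i < len(password) - 1:
--         if password[i] == password[i + 1]:
--             pairs.add(password[i])
--             i += 2
--         else:
--             i += 1
--     return len(pairs) >= 2
-- ===== SOURCE B (Python) =====
-- def contains_two_pairs(password):
--     return len({a for a, b in zip(password, password[1:]) if a == b}) >= 2
-- ===== Notes on version B (the rewrite author's own statement) =====
-- stated objective: idiomatic
-- what changed: Replaces the index-driven while loop with skip-2 consumption and a mutated set accumulator by a single set comprehension over zip(password, password[1:]) collecting the letters of all (possibly overlapping) adjacent equal pairs; overlapping pairs share their letter, so the distinct-letter set is the same.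
import Mathlib
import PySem

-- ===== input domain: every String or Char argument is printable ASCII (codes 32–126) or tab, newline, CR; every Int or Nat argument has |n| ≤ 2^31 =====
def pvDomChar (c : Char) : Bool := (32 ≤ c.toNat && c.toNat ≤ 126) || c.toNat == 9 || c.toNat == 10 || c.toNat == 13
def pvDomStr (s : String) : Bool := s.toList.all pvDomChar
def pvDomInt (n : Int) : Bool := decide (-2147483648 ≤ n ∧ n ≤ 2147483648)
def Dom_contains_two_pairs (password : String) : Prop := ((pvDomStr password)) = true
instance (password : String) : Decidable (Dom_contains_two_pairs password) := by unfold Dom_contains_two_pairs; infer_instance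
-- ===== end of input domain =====

-- B replaces A's index-driven skip-2 while loop by a set comprehension over zip(password, password[1:]);
-- equivalence is proved for the return value (A mutates no argument).

-- ===== PORT A =====
-- the while loop: state is the set `pairs` and the index `i`
def pvALoop (cs : List Char) (pairs : PySem.Set Char) (i : Nat) : PySem.Set Char :=
  if h : i + 1 < cs.length then
    if cs[i] = cs[i + 1] then
      pvALoop cs (PySem.Set.add pairs cs[i]) (i + 2)
    else
      pvALoop cs pairs (i + 1)
  else pairs
termination_by cs.length - i

def contains_two_pairs (password : String) : Bool :=
  decide (2 ≤ (pvALoop password.toList PySem.Set.empty 0).length)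

-- ===== PORT B =====
def contains_two_pairs_alt (password : String) : Bool :=
  let cs := password.toList
  let pairs := PySem.Set.ofList
    ((cs.zip (PySem.List.slice cs (some 1) none)).filterMap
      (fun p => if p.1 = p.2 then some p.1 else none))
  decide (2 ≤ pairs.length)

-- ===== PRECONDITION & SPEC =====
def Spec_contains_two_pairs (password : String) (out : Bool) : Prop := out = contains_two_pairs_alt password
instance (password : String) (out : Bool) : Decidable (Spec_contains_two_pairs password out) := by unfold Spec_contains_two_pairs; infer_instance

-- ===== CLAIM (what is proved, stated in full; the proofs are below) =====
def Claim_equal_contains_two_pairs : Prop := ∀ (password : String), Dom_contains_two_pairs password → Spec_contains_two_pairs password (contains_two_pairs password)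

-- ===== LEMMAS AND PROOFS =====

-- the predicate both result sets characterize: c heads an adjacent equal pair
def PairAt (cs : List Char) (c : Char) (j : Nat) : Prop :=
  ∃ h : j + 1 < cs.length, cs[j] = c ∧ cs[j + 1] = c

lemma mem_pvALoop (cs : List Char) (pairs : PySem.Set Char) (i : Nat) (c : Char) :
    c ∈ pvALoop cs pairs i ↔ c ∈ pairs ∨ ∃ j, i ≤ j ∧ PairAt cs c j := by
  fun_induction pvALoop cs pairs i with
  | case1 pairs i h heq ih =>
    rw [ih, PySem.Set.mem_add]
    constructor
    · rintro ((hc | rfl) | ⟨j, hij, hp⟩)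
      · exact Or.inl hc
      · exact Or.inr ⟨i, le_refl _, h, rfl, heq.symm⟩
      · exact Or.inr ⟨j, by omega, hp⟩
    · rintro (hc | ⟨j, hij, hj, hc1, hc2⟩)
      · exact Or.inl (Or.inl hc)
      · rcases Nat.lt_or_ge j (i + 2) with hlt | hge
        · have hji : j = i ∨ j = i + 1 := by omega
          rcases hji with rfl | rfl
          · exact Or.inl (Or.inr hc1.symm)
          · exact Or.inl (Or.inr (by rw [← hc1, heq]))
        · exact Or.inr ⟨j, hge, hj, hc1, hc2⟩
  | case2 pairs i h hne ih =>
    rw [ih]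
    constructor
    · rintro (hc | ⟨j, hij, hp⟩)
      · exact Or.inl hc
      · exact Or.inr ⟨j, by omega, hp⟩
    · rintro (hc | ⟨j, hij, hj, hc1, hc2⟩)
      · exact Or.inl hc
      · rcases Nat.lt_or_ge j (i + 1) with hlt | hge
        · have : j = i := by omega
          subst this
          exact absurd (hc1.trans hc2.symm) hne
        · exact Or.inr ⟨j, hge, hj, hc1, hc2⟩
  | case3 pairs i h =>
    constructor
    · exact Or.inl
    · rintro (hc | ⟨j, hij, hj, _⟩)
      · exact hc
      · omega

lemma nodup_pvALoop (cs : List Char) (pairs : PySem.Set Char) (i : Nat)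
    (hnd : pairs.Nodup) : (pvALoop cs pairs i).Nodup := by
  fun_induction pvALoop cs pairs i with
  | case1 pairs i h heq ih => exact ih (PySem.Set.nodup_add _ _ hnd)
  | case2 pairs i h hne ih => exact ih hnd
  | case3 pairs i h => exact hnd

lemma mem_bSet (cs : List Char) (c : Char) :
    c ∈ PySem.Set.ofList
        ((cs.zip (PySem.List.slice cs (some 1) none)).filterMap
          (fun p => if p.1 = p.2 then some p.1 else none)) ↔
      ∃ j, PairAt cs c j := by
  rw [PySem.Set.mem_ofList, List.mem_filterMap]
  rw [PySem.List.slice_from_one]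
  constructor
  · rintro ⟨⟨a, b⟩, hab, hif⟩
    simp only at hif
    split_ifs at hif with hab'
    · cases hif
      rcases List.mem_iff_getElem.mp hab with ⟨j, hj, hget⟩
      rw [List.getElem_zip] at hget
      have hlen : j + 1 < cs.length := by
        have := hj
        simp [List.length_zip, List.length_tail] at this
        omega
      have h1 : cs[j] = c := by
        have := congrArg Prod.fst hget; simpa using this
      have h2 : cs[j + 1] = c := by
        have := congrArg Prod.snd hget
        simp [List.getElem_tail] at this
        exact this.trans hab'.symm
      exact ⟨j, hlen, h1, h2⟩
  · rintro ⟨j, hj, hc1, hc2⟩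
    refine ⟨(c, c), ?_, by simp⟩
    apply List.mem_iff_getElem.mpr
    refine ⟨j, ?_, ?_⟩
    · simp [List.length_zip, List.length_tail]; omega
    · rw [List.getElem_zip]
      simp [List.getElem_tail, hc1, hc2]

-- ===== VERDICT (by name: the statement is the Claim_ definition above) =====
theorem contains_two_pairs_spec : Claim_equal_contains_two_pairs := by
  intro password _
  unfold Spec_contains_two_pairs contains_two_pairs contains_two_pairs_alt
  have hperm :
      (pvALoop password.toList PySem.Set.empty 0).Perm
        (PySem.Set.ofList
          ((password.toList.zip (PySem.List.slice password.toList (some 1) none)).filterMap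
            (fun p => if p.1 = p.2 then some p.1 else none))) := by
    apply (List.perm_ext_iff_of_nodup (nodup_pvALoop _ _ _ List.nodup_nil)
      (PySem.Set.nodup_ofList _)).mpr
    intro c
    rw [mem_pvALoop, mem_bSet]
    simp only [List.not_mem_nil, false_or, Nat.zero_le, true_and]
  simp only [hperm.length_eq]
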